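-- pv_equiv track=rewrite | github.com/Nareeek/Codesignal_tasks | prime/greatestCommonPrimeDivisor.py | greatestCommonPrimeDivisor
-- ===== SOURCE A (Python) =====
-- import math
--
-- def greatestCommonPrimeDivisor(a, b):
--     a = math.gcd(a, b)
--
--     i = 2
--     while i < a:
--         if a % i == 0:
--             a //= i
--         else:
--             i += 1
--
--     return a if a != 1 else -1
-- ===== SOURCE B (Python) =====
-- import math
--
-- def greatestCommonPrimeDivisor(a, b):
--     g = math.gcd(a, b)
--     if g <= 1:
--         return -1
--     largest = -1
--     d = 2
--     while d * d <= g: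
--         if g % d == 0:
--             largest = d
--             while g % d == 0:
--                 g //= d
--         d += 1
--     return g if g > 1 else largest
-- ===== Notes on version B (the rewrite author's own statement) =====
-- stated objective: faster
-- what changed: A repeatedly divides gcd(a,b) by its smallest factor, scanning i up to the current value (O(g) for a prime gcd g); B trial-divides only up to sqrt(g), stripping each factor completely and keeping the largest, so it runs in O(sqrt(g)).
-- intended difference: On a = b = 0 (gcd 0) A returns 0, which is not a prime divisor; B returns -1, the intended no-prime-divisor answer that A itself uses for gcd 1. — e.g. on greatestCommonPrimeDivisor(0, 0): A returns 0, B returns -1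
import Mathlib
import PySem

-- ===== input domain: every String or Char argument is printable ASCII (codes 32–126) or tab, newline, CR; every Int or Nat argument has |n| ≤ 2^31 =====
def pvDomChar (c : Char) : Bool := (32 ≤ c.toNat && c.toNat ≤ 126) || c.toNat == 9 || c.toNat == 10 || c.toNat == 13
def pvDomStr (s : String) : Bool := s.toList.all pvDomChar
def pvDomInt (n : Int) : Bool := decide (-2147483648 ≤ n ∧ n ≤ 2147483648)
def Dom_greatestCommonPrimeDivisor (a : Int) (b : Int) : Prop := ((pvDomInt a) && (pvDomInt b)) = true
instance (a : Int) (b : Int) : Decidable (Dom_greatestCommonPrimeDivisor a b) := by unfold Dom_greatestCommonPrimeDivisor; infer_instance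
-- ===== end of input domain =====

-- B factorizes gcd(a,b) by trial division up to sqrt instead of A's smallest-factor stripping that scans up to the current value; on (0,0) B returns -1 where A returns 0 (see D_).

-- ===== PORT A =====
-- A's while loop: i = 2; while i < a: divide a by i when possible, else i += 1.
-- The '2 ≤ i' conjunct only makes the recursion total (i starts at 2 and never decreases).
theorem pvDecSub1 (a i : Nat) (h2 : 2 ≤ i) (hia : i < a) : a / i * 2 - i < a * 2 - i := by
  have := Nat.div_lt_self (show 0 < a by omega) (show 1 < i by omega)
  omega

theorem pvDecSub2 (a i : Nat) (hia : i < a) : a * 2 - (i + 1) < a * 2 - i := by omega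

def pvLoopA (a i : Nat) : Nat :=
  if h : 2 ≤ i ∧ i < a then
    if a % i = 0 then pvLoopA (a / i) i else pvLoopA a (i + 1)
  else a
termination_by a * 2 - i
decreasing_by
  · exact pvDecSub1 a i h.1 h.2
  · exact pvDecSub2 a i h.2

def greatestCommonPrimeDivisor (a : Int) (b : Int) : Int :=
  let g : Nat := Int.gcd a b
  let r : Int := (pvLoopA g 2 : Nat)
  if r ≠ 1 then r else -1

-- ===== PORT B =====
-- inner 'while g % d == 0: g //= d'; the '2 ≤ d ∧ 1 ≤ g' conjuncts only make it total.
def pvDivOut (g d : Nat) : Nat :=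
  if _h : 2 ≤ d ∧ 1 ≤ g ∧ g % d = 0 then pvDivOut (g / d) d else g
termination_by g
decreasing_by
  exact Nat.div_lt_self _h.2.1 _h.1

theorem pvDivOut_le (g d : Nat) : pvDivOut g d ≤ g := by
  fun_induction pvDivOut g d with
  | case1 g h ih => exact le_trans ih (Nat.div_le_self _ _)
  | case2 => exact le_refl _

theorem pvDecSub3 (g d : Nat) (h2 : 2 ≤ d) (hdd : d * d ≤ g) :
    pvDivOut g d + 1 - (d + 1) < g + 1 - d := by
  have h1 := pvDivOut_le g d
  have h3 : d * 1 ≤ d * d := Nat.mul_le_mul_left d (by omega)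
  omega

theorem pvDecSub4 (g d : Nat) (h2 : 2 ≤ d) (hdd : d * d ≤ g) : g + 1 - (d + 1) < g + 1 - d := by
  have h3 : d * 1 ≤ d * d := Nat.mul_le_mul_left d (by omega)
  omega

-- outer 'while d * d <= g'; the '2 ≤ d' conjunct only makes the recursion total.
def pvLoopB (g d : Nat) (largest : Int) : Int :=
  if _h : 2 ≤ d ∧ d * d ≤ g then
    if g % d = 0 then pvLoopB (pvDivOut g d) (d + 1) (d : Int)
    else pvLoopB g (d + 1) largest
  else if 1 < g then (g : Int) else largest
termination_by g + 1 - d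
decreasing_by
  · exact pvDecSub3 g d _h.1 _h.2
  · exact pvDecSub4 g d _h.1 _h.2

def greatestCommonPrimeDivisor_alt (a : Int) (b : Int) : Int :=
  let g : Nat := Int.gcd a b
  if (g : Int) ≤ 1 then -1 else pvLoopB g 2 (-1)

-- ===== PRECONDITION & SPEC =====
-- On a = b = 0 (gcd 0) A returns 0, which is not a prime divisor; B returns -1, the intended no-prime-divisor answer that A itself uses for gcd 1.
def D_greatestCommonPrimeDivisor (a : Int) (b : Int) : Prop := a = 0 ∧ b = 0
instance (a : Int) (b : Int) : Decidable (D_greatestCommonPrimeDivisor a b) := by unfold D_greatestCommonPrimeDivisor; infer_instance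
def Spec_greatestCommonPrimeDivisor (a : Int) (b : Int) (out : Int) : Prop := ¬ D_greatestCommonPrimeDivisor a b → out = greatestCommonPrimeDivisor_alt a b
instance (a : Int) (b : Int) (out : Int) : Decidable (Spec_greatestCommonPrimeDivisor a b out) := by unfold Spec_greatestCommonPrimeDivisor; infer_instance
def pvDiffWitness_greatestCommonPrimeDivisor : Int × Int := (0, 0)
def pvDiffWitnessOut_greatestCommonPrimeDivisor : Int × Int := (0, -1)

-- ===== CLAIM (what is proved, stated in full; the proofs are below) =====
def Claim_unchanged_greatestCommonPrimeDivisor : Prop := ∀ (a : Int) (b : Int), Dom_greatestCommonPrimeDivisor a b → Spec_greatestCommonPrimeDivisor a b (greatestCommonPrimeDivisor a b)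
def Claim_changed_greatestCommonPrimeDivisor : Prop := Dom_greatestCommonPrimeDivisor (pvDiffWitness_greatestCommonPrimeDivisor.1) (pvDiffWitness_greatestCommonPrimeDivisor.2) ∧ D_greatestCommonPrimeDivisor (pvDiffWitness_greatestCommonPrimeDivisor.1) (pvDiffWitness_greatestCommonPrimeDivisor.2) ∧ greatestCommonPrimeDivisor (pvDiffWitness_greatestCommonPrimeDivisor.1) (pvDiffWitness_greatestCommonPrimeDivisor.2) = pvDiffWitnessOut_greatestCommonPrimeDivisor.1 ∧ greatestCommonPrimeDivisor_alt (pvDiffWitness_greatestCommonPrimeDivisor.1) (pvDiffWitness_greatestCommonPrimeDivisor.2) = pvDiffWitnessOut_greatestCommonPrimeDivisor.2 ∧ pvDiffWitnessOut_greatestCommonPrimeDivisor.1 ≠ pvDiffWitnessOut_greatestCommonPrimeDivisor.2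
def Claim_exact_greatestCommonPrimeDivisor : Prop := ∀ (a : Int) (b : Int), Dom_greatestCommonPrimeDivisor a b → D_greatestCommonPrimeDivisor a b → greatestCommonPrimeDivisor a b ≠ greatestCommonPrimeDivisor_alt a b

-- ===== LEMMAS AND PROOFS =====

-- r is the greatest prime divisor of n
def IsMaxPF (n r : Nat) : Prop := r.Prime ∧ r ∣ n ∧ ∀ p, p.Prime → p ∣ n → p ≤ r

theorem isMaxPF_unique {n r s : Nat} (hr : IsMaxPF n r) (hs : IsMaxPF n s) : r = s :=
  Nat.le_antisymm (hs.2.2 r hr.1 hr.2.1) (hr.2.2 s hs.1 hs.2.1)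

-- the smallest candidate divisor i is prime when it divides a and a has no prime factor below i
theorem min_div_prime {a i : Nat} (h2 : 2 ≤ i) (ha : 2 ≤ a) (hia : i ∣ a)
    (hinv : ∀ p, Nat.Prime p → p ∣ a → i ≤ p) : Nat.Prime i := by
  have h1 : a ≠ 1 := by omega
  have hprime := Nat.minFac_prime h1
  have hle : Nat.minFac a ≤ i := Nat.minFac_le_of_dvd h2 hia
  have hge : i ≤ Nat.minFac a := hinv _ hprime (Nat.minFac_dvd a)
  have heq : Nat.minFac a = i := le_antisymm hle hge
  rwa [← heq]

theorem loopA_maxPF : ∀ a i : Nat, 2 ≤ i → 2 ≤ a →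
    (∀ p, Nat.Prime p → p ∣ a → i ≤ p) → IsMaxPF a (pvLoopA a i) := by
  intro a i
  fun_induction pvLoopA a i with
  | case1 a i h hdvd ih =>
    intro h2 ha hinv
    have hia : i ∣ a := Nat.dvd_of_mod_eq_zero hdvd
    have hipr : Nat.Prime i := min_div_prime h2 ha hia hinv
    obtain ⟨k, hk⟩ := hia
    have hk2 : 2 ≤ k := by
      rcases Nat.lt_or_ge k 2 with hlt | hge
      · interval_cases k <;> omega
      · exact hge
    have hai : 2 ≤ a / i := by
      rw [hk, Nat.mul_div_cancel_left _ (by omega : 0 < i)]; exact hk2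
    have hdvd' : i ∣ a := ⟨k, hk⟩
    have hinv' : ∀ p, Nat.Prime p → p ∣ a / i → i ≤ p := fun p hp hpd =>
      hinv p hp (hpd.trans (Nat.div_dvd_of_dvd hdvd'))
    obtain ⟨hr1, hr2, hr3⟩ := ih h2 hai hinv'
    refine ⟨hr1, hr2.trans (Nat.div_dvd_of_dvd hdvd'), ?_⟩
    intro p hp hpa
    have hpm : p ∣ i * (a / i) := by rwa [Nat.mul_div_cancel' hdvd']
    rcases (Nat.Prime.dvd_mul hp).1 hpm with hpi | hpq
    · have hpe : p = i := (Nat.prime_dvd_prime_iff_eq hp hipr).1 hpi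
      have : i ≤ pvLoopA (a / i) i := hinv' _ hr1 hr2
      omega
    · exact hr3 p hp hpq
  | case2 a i h hndvd ih =>
    intro h2 ha hinv
    refine ih (by omega) ha ?_
    intro p hp hpa
    have hge := hinv p hp hpa
    have hne : p ≠ i := by
      intro he; subst he
      exact hndvd (Nat.mod_eq_zero_of_dvd hpa)
    omega
  | case3 a i h =>
    intro h2 ha hinv
    have hia : a ≤ i := by omega
    have h1 : a ≠ 1 := by omega
    have hprime : Nat.Prime a := by
      have hmp := Nat.minFac_prime h1
      have hge : i ≤ Nat.minFac a := hinv _ hmp (Nat.minFac_dvd a)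
      have hle : Nat.minFac a ≤ a := Nat.minFac_le (by omega)
      have : Nat.minFac a = a := by omega
      rwa [← this]
    exact ⟨hprime, dvd_refl a, fun p _ hpd => Nat.le_of_dvd (by omega) hpd⟩

theorem divOut_spec : ∀ g d : Nat, Nat.Prime d → 1 ≤ g →
    1 ≤ pvDivOut g d ∧ pvDivOut g d ∣ g ∧ ¬ d ∣ pvDivOut g d ∧
      (∀ p, Nat.Prime p → p ∣ g → p = d ∨ p ∣ pvDivOut g d) := by
  intro g d
  fun_induction pvDivOut g d with
  | case1 g h ih =>
    intro hd hg
    have hdg : d ∣ g := Nat.dvd_of_mod_eq_zero h.2.2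
    have hg' : 1 ≤ g / d := Nat.one_le_div_iff (by omega) |>.2 (Nat.le_of_dvd hg hdg)
    obtain ⟨h1, h2, h3, h4⟩ := ih hd hg'
    refine ⟨h1, h2.trans (Nat.div_dvd_of_dvd hdg), h3, ?_⟩
    intro p hp hpg
    have hpm : p ∣ d * (g / d) := by rwa [Nat.mul_div_cancel' hdg]
    rcases (Nat.Prime.dvd_mul hp).1 hpm with hpd | hpq
    · exact Or.inl ((Nat.prime_dvd_prime_iff_eq hp hd).1 hpd)
    · exact h4 p hp hpq
  | case2 g h =>
    intro hd hg
    have h2 : 2 ≤ d := hd.two_le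
    have hnd : ¬ d ∣ g := fun hdvd => h ⟨h2, hg, Nat.mod_eq_zero_of_dvd hdvd⟩
    exact ⟨hg, dvd_refl g, hnd, fun p hp hpg => Or.inr hpg⟩

theorem loopB_spec : ∀ g d : Nat, ∀ largest : Int, 2 ≤ d → 1 ≤ g →
    (∀ p, Nat.Prime p → p ∣ g → d ≤ p) →
    (g = 1 → pvLoopB g d largest = largest) ∧
    (2 ≤ g → ∃ r : Nat, pvLoopB g d largest = (r : Int) ∧ IsMaxPF g r) := by
  intro g d largest
  fun_induction pvLoopB g d largest with
  | case1 g d largest h hdvd ih =>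
    intro h2 hg hinv
    have hdd : d * 1 ≤ d * d := Nat.mul_le_mul_left d (by omega)
    have hg2 : 2 ≤ g := by omega
    have hdg : d ∣ g := Nat.dvd_of_mod_eq_zero hdvd
    have hdpr : Nat.Prime d := min_div_prime h2 hg2 hdg hinv
    obtain ⟨h1', h2', h3', h4'⟩ := divOut_spec g d hdpr hg
    have hinv' : ∀ p, Nat.Prime p → p ∣ pvDivOut g d → d + 1 ≤ p := by
      intro p hp hpd
      have := hinv p hp (hpd.trans h2')
      have hne : p ≠ d := fun he => h3' (he ▸ hpd)
      omega
    have ihh := ih (by omega) h1' hinv'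
    refine ⟨fun h1 => by omega, fun _ => ?_⟩
    rcases Nat.lt_or_ge (pvDivOut g d) 2 with hlt | hge
    · have he1 : pvDivOut g d = 1 := by omega
      refine ⟨d, ihh.1 he1, hdpr, hdg, ?_⟩
      intro p hp hpg
      rcases h4' p hp hpg with rfl | hpq
      · exact le_refl _
      · rw [he1] at hpq
        exact absurd (Nat.eq_one_of_dvd_one hpq) hp.ne_one
    · obtain ⟨r, hr, hm1, hm2, hm3⟩ := ihh.2 hge
      refine ⟨r, hr, hm1, hm2.trans h2', ?_⟩
      intro p hp hpg
      rcases h4' p hp hpg with rfl | hpq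
      · have := hinv' r hm1 hm2; omega
      · exact hm3 p hp hpq
  | case2 g d largest h hndvd ih =>
    intro h2 hg hinv
    refine ih (by omega) hg ?_
    intro p hp hpg
    have hge := hinv p hp hpg
    have hne : p ≠ d := by
      intro he; subst he
      exact hndvd (Nat.mod_eq_zero_of_dvd hpg)
    omega
  | case3 g d largest h hgt =>
    intro h2 hg hinv
    refine ⟨fun hg1 => by omega, fun hg2 => ?_⟩
    have hprime : Nat.Prime g := by
      by_contra hnp
      have hsq := Nat.minFac_sq_le_self (show 0 < g by omega) hnp
      have hd := hinv _ (Nat.minFac_prime (by omega)) (Nat.minFac_dvd g)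
      have hmul : d * d ≤ Nat.minFac g * Nat.minFac g := Nat.mul_le_mul hd hd
      have hsq' : Nat.minFac g * Nat.minFac g ≤ g := by rwa [sq] at hsq
      exact h ⟨h2, le_trans hmul hsq'⟩
    exact ⟨g, rfl, hprime, dvd_refl g, fun p _ hpd => Nat.le_of_dvd (by omega) hpd⟩
  | case4 g d largest h hng =>
    intro h2 hg hinv
    exact ⟨fun _ => rfl, fun hg2 => absurd hg2 (by omega)⟩

theorem pvLoopA_stop (a i : Nat) (h : ¬ (2 ≤ i ∧ i < a)) : pvLoopA a i = a := by
  rw [pvLoopA]; simp [h]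

theorem portA_00 : greatestCommonPrimeDivisor 0 0 = 0 := by
  have h0 : Int.gcd (0 : Int) 0 = 0 := by decide
  simp [greatestCommonPrimeDivisor, pvLoopA_stop 0 2 (by omega)]

theorem portB_00 : greatestCommonPrimeDivisor_alt 0 0 = -1 := by
  norm_num [greatestCommonPrimeDivisor_alt, Int.gcd]

-- ===== VERDICT (by name: the statement is the Claim_ definition above) =====
theorem greatestCommonPrimeDivisor_spec : Claim_unchanged_greatestCommonPrimeDivisor := by
  unfold Claim_unchanged_greatestCommonPrimeDivisor Spec_greatestCommonPrimeDivisor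
  intro a b _ hND
  have hg0 : Int.gcd a b ≠ 0 := by
    intro h0
    exact hND (Int.gcd_eq_zero_iff.1 h0)
  rcases Nat.lt_or_ge (Int.gcd a b) 2 with hlt | hge
  · have hg1 : Int.gcd a b = 1 := by omega
    have hA1 : pvLoopA 1 2 = 1 := pvLoopA_stop 1 2 (by omega)
    simp [greatestCommonPrimeDivisor, greatestCommonPrimeDivisor_alt, hg1, hA1]
  · have hA := loopA_maxPF (Int.gcd a b) 2 (le_refl 2) hge (fun p hp _ => hp.two_le)
    obtain ⟨r, hr, hm⟩ :=
      (loopB_spec (Int.gcd a b) 2 (-1) (le_refl 2) (by omega) (fun p hp _ => hp.two_le)).2 hge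
    have heq : pvLoopA (Int.gcd a b) 2 = r := isMaxPF_unique hA hm
    have h2r : 2 ≤ r := hm.1.two_le
    simp only [greatestCommonPrimeDivisor, greatestCommonPrimeDivisor_alt, heq, hr]
    have hc1 : ((r : Int) ≠ 1) := by omega
    have hc2 : ¬ ((Int.gcd a b : Int) ≤ 1) := by
      have : (2 : Int) ≤ (Int.gcd a b : Nat) := by exact_mod_cast hge
      omega
    simp [hc1, hc2]

theorem greatestCommonPrimeDivisor_changed : Claim_changed_greatestCommonPrimeDivisor := by
  unfold Claim_changed_greatestCommonPrimeDivisor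
  refine ⟨by decide, by decide, portA_00, portB_00, by decide⟩

theorem greatestCommonPrimeDivisor_tight : Claim_exact_greatestCommonPrimeDivisor := by
  unfold Claim_exact_greatestCommonPrimeDivisor
  intro a b _ hD
  obtain ⟨rfl, rfl⟩ := hD
  rw [portA_00, portB_00]
  decide
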